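-- pv_equiv track=rewrite | github.com/jahnavi249/genie | xslt/universal_ai_processor.py | _validate_xml_structure
-- ===== SOURCE A (Python) =====
-- def _validate_xml_structure(xml_content: str) -> str:
--     """Basic XML structure validation"""
--     try:
--         # Try to parse as XML to check structure
--         # Remove any non-XML content first
--         lines = xml_content.split('\n')
--         xml_lines = []
--
--         for line in lines:
--             stripped = line.strip()
--             if stripped and (stripped.startswith('<') or xml_lines):
--                 xml_lines.append(line)
--                 if stripped.endswith('>') and not stripped.startswith('<!--'):
--                     # Check if this might be the end of the XML
--                     break
--
--         return '\n'.join(xml_lines)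
--
--     except Exception:
--         # If validation fails, return original content
--         return xml_content
-- ===== SOURCE B (Python) =====
-- def _validate_xml_structure(xml_content: str) -> str:
--     """Basic XML structure validation (declarative: filter the whole suffix, find cut index, slice)."""
--     try:
--         lines = xml_content.split('\n')
--
--         def _is_start(line):
--             s = line.strip()
--             return bool(s) and s.startswith('<')
--
--         def _is_closer(line):
--             s = line.strip()
--             return s.endswith('>') and not s.startswith('<!--')
--
--         start = next((i for i, l in enumerate(lines) if _is_start(l)), None)
--         if start is None:
--             return ''
--         kept = [l for l in lines[start:] if l.strip()]
--         cut = next((j for j, l in enumerate(kept) if _is_closer(l)), None)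
--         if cut is not None:
--             kept = kept[:cut + 1]
--         return '\n'.join(kept)
--     except Exception:
--         return xml_content
-- ===== Notes on version B (the rewrite author's own statement) =====
-- stated objective: alternative
-- what changed: Replaces A's single stateful loop (accumulator doubling as a started-flag, break inside the loop) by a loop-free declarative pipeline: locate the first '<'-line index with next(enumerate), build the full list of non-blank lines of the suffix via a comprehension, locate the first closing line with a second next(enumerate), and slice the list at that cut point.
import Mathlib
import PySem

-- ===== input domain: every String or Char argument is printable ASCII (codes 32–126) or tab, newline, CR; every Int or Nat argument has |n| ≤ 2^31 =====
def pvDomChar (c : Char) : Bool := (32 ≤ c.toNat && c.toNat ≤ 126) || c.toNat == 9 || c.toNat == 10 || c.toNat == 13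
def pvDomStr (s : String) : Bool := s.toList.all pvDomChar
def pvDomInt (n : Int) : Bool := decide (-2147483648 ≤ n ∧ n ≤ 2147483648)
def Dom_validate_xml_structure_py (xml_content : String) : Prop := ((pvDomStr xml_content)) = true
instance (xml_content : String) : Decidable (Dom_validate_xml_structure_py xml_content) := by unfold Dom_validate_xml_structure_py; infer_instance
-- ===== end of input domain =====

-- B replaces A's stateful break-loop by a loop-free pipeline: find-index, filter, find-cut-index, slice (objective: alternative).
-- A's try/except is unreachable (no statement inside can raise), so both ports omit it.

-- ===== PORT A =====
-- A's single loop: the accumulator doubles as the "started" flag via `acc ≠ []`.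
def pvALoop : List String → List String → List String
  | [], acc => acc
  | l :: rest, acc =>
    let s := PySem.Str.strip l
    if s ≠ "" ∧ (PySem.Str.startswith s "<" = true ∨ acc ≠ []) then
      if PySem.Str.endswith s ">" = true ∧ ¬ (PySem.Str.startswith s "<!--" = true) then
        acc ++ [l]
      else
        pvALoop rest (acc ++ [l])
    else
      pvALoop rest acc

def validate_xml_structure_py (xml_content : String) : String :=
  PySem.Str.join "\n" (pvALoop (((PySem.Str.split? xml_content "\n").getD [])) [])

-- ===== PORT B =====
-- Source B's helper predicates _is_start / _is_closer.
def pvIsStart (l : String) : Bool :=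
  decide (PySem.Str.strip l ≠ "") && PySem.Str.startswith (PySem.Str.strip l) "<"

def pvIsCloser (l : String) : Bool :=
  PySem.Str.endswith (PySem.Str.strip l) ">" && ! PySem.Str.startswith (PySem.Str.strip l) "<!--"

-- next((i for i,l in enumerate(lines) if p(l)), None) is exactly List.findIdx?;
-- lines[start:] with the found (hence in-range, non-negative) index is List.drop;
-- kept[:cut+1] with 0 ≤ cut+1 is List.take.
def validate_xml_structure_py_alt (xml_content : String) : String :=
  let lines := (PySem.Str.split? xml_content "\n").getD []
  match lines.findIdx? pvIsStart with
  | none => ""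
  | some start =>
    let kept := (lines.drop start).filter (fun l => PySem.Str.strip l ≠ "")
    let kept2 :=
      match kept.findIdx? pvIsCloser with
      | none => kept
      | some cut => kept.take (cut + 1)
    PySem.Str.join "\n" kept2

-- ===== PRECONDITION & SPEC =====
def Spec_validate_xml_structure_py (xml_content : String) (out : String) : Prop := out = validate_xml_structure_py_alt xml_content
instance (xml_content : String) (out : String) : Decidable (Spec_validate_xml_structure_py xml_content out) := by unfold Spec_validate_xml_structure_py; infer_instance

-- ===== CLAIM (what is proved, stated in full; the proofs are below) =====
def Claim_equal_validate_xml_structure_py : Prop := ∀ (xml_content : String), Dom_validate_xml_structure_py xml_content → Spec_validate_xml_structure_py xml_content (validate_xml_structure_py xml_content)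

-- ===== LEMMAS AND PROOFS =====

-- Proof-side abbreviations for the two stages of B's pipeline.
def pvCut (f : List String) : List String :=
  match f.findIdx? pvIsCloser with
  | none => f
  | some cut => f.take (cut + 1)

def pvStartCase (lines : List String) : List String :=
  match lines.findIdx? pvIsStart with
  | none => []
  | some start => pvCut ((lines.drop start).filter (fun l => PySem.Str.strip l ≠ ""))

theorem pvCut_nil : pvCut [] = [] := rfl

theorem pvCut_cons (l : String) (f : List String) :
    pvCut (l :: f) = if pvIsCloser l then [l] else l :: pvCut f := by
  simp only [pvCut, List.findIdx?_cons]
  cases h : pvIsCloser l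
  · simp only [cond_false, if_false, Bool.false_eq_true]
    cases hf : f.findIdx? pvIsCloser <;> simp [hf, List.take_succ_cons]
  · simp [List.take_succ_cons]

theorem pvStartCase_cons_neg (l : String) (rest : List String) (h : pvIsStart l = false) :
    pvStartCase (l :: rest) = pvStartCase rest := by
  simp only [pvStartCase, List.findIdx?_cons, h, cond_false]
  cases hf : rest.findIdx? pvIsStart <;> simp [hf, List.drop_succ_cons]

theorem pvStartCase_cons_pos (l : String) (rest : List String) (h : pvIsStart l = true) :
    pvStartCase (l :: rest) = pvCut ((l :: rest).filter (fun l => PySem.Str.strip l ≠ "")) := by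
  simp [pvStartCase, List.findIdx?_cons, h]

-- Once started (acc ≠ []), A's loop appends exactly B's filter-then-cut of the remaining lines.
theorem pvALoop_started (rest : List String) : ∀ acc : List String, acc ≠ [] →
    pvALoop rest acc = acc ++ pvCut (rest.filter (fun l => PySem.Str.strip l ≠ "")) := by
  induction rest with
  | nil => intro acc _; simp [pvALoop, pvCut_nil]
  | cons l rest ih =>
    intro acc hacc
    simp only [pvALoop]
    by_cases hs : PySem.Str.strip l = ""
    · rw [if_neg (by simp [hs])]
      rw [ih acc hacc]
      simp [List.filter_cons, hs]
    · rw [if_pos ⟨hs, Or.inr hacc⟩]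
      have hfil : (l :: rest).filter (fun l => PySem.Str.strip l ≠ "") =
          l :: rest.filter (fun l => PySem.Str.strip l ≠ "") := by
        simp [List.filter_cons, hs]
      by_cases hc : PySem.Str.endswith (PySem.Str.strip l) ">" = true ∧
          ¬ (PySem.Str.startswith (PySem.Str.strip l) "<!--" = true)
      · rw [if_pos hc]
        have hcl : pvIsCloser l = true := by
          unfold pvIsCloser
          simp only [Bool.and_eq_true, Bool.not_eq_true']
          exact ⟨hc.1, Bool.eq_false_iff.mpr hc.2⟩
        rw [hfil, pvCut_cons, if_pos hcl]
      · rw [if_neg hc]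
        have hcl : pvIsCloser l = false := by
          unfold pvIsCloser
          by_cases he : PySem.Str.endswith (PySem.Str.strip l) ">" = true
          · have hsw : PySem.Str.startswith (PySem.Str.strip l) "<!--" = true := by
              by_contra h; exact hc ⟨he, h⟩
            rw [he, hsw]; rfl
          · rw [Bool.eq_false_iff.mpr he]; rfl
        rw [ih (acc ++ [l]) (by simp), hfil, pvCut_cons, if_neg (by simp [hcl])]
        simp

-- From the empty accumulator, A's loop computes B's whole pipeline.
theorem pvALoop_eq (lines : List String) : pvALoop lines [] = pvStartCase lines := by
  induction lines with
  | nil => rfl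
  | cons l rest ih =>
    simp only [pvALoop]
    by_cases hst : pvIsStart l = true
    · have hparts := hst
      unfold pvIsStart at hparts
      simp only [Bool.and_eq_true, decide_eq_true_eq] at hparts
      rw [if_pos ⟨hparts.1, Or.inl hparts.2⟩]
      rw [pvStartCase_cons_pos l rest hst]
      have hfil : (l :: rest).filter (fun l => PySem.Str.strip l ≠ "") =
          l :: rest.filter (fun l => PySem.Str.strip l ≠ "") := by
        simp [List.filter_cons, hparts.1]
      by_cases hc : PySem.Str.endswith (PySem.Str.strip l) ">" = true ∧
          ¬ (PySem.Str.startswith (PySem.Str.strip l) "<!--" = true)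
      · rw [if_pos hc]
        have hcl : pvIsCloser l = true := by
          unfold pvIsCloser
          simp only [Bool.and_eq_true, Bool.not_eq_true']
          exact ⟨hc.1, Bool.eq_false_iff.mpr hc.2⟩
        rw [hfil, pvCut_cons, if_pos hcl]
        rfl
      · rw [if_neg hc]
        have hcl : pvIsCloser l = false := by
          unfold pvIsCloser
          by_cases he : PySem.Str.endswith (PySem.Str.strip l) ">" = true
          · have hsw : PySem.Str.startswith (PySem.Str.strip l) "<!--" = true := by
              by_contra h; exact hc ⟨he, h⟩
            rw [he, hsw]; rfl
          · rw [Bool.eq_false_iff.mpr he]; rfl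
        simp only [List.nil_append]
        rw [pvALoop_started rest [l] (by simp), hfil, pvCut_cons, if_neg (by simp [hcl])]
        rfl
    · have hst' : pvIsStart l = false := Bool.eq_false_iff.mpr hst
      have hparts := hst'
      unfold pvIsStart at hparts
      have hni : ¬ (PySem.Str.strip l ≠ "" ∧
          (PySem.Str.startswith (PySem.Str.strip l) "<" = true ∨ ([] : List String) ≠ [])) := by
        rintro ⟨h1, h2 | h2⟩
        · rw [decide_eq_true h1, h2] at hparts; exact Bool.true_eq_false.mp hparts
        · exact h2 rfl
      rw [if_neg hni, ih, pvStartCase_cons_neg l rest hst']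

-- ===== VERDICT (by name: the statement is the Claim_ definition above) =====
theorem validate_xml_structure_py_spec : Claim_equal_validate_xml_structure_py := by
  intro xml_content _
  unfold Spec_validate_xml_structure_py validate_xml_structure_py validate_xml_structure_py_alt
  rw [pvALoop_eq]
  unfold pvStartCase
  cases hfi : List.findIdx? pvIsStart (((PySem.Str.split? xml_content "\n").getD [])) with
  | none => simp [hfi, PySem.Str.join, PySem.Chars.join, List.intercalate]
  | some start => simp [hfi, pvCut]
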